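-- pv_equiv track=rewrite | github.com/bssrdf/pyleet | T/TimeNeededtoRearrangeaBinaryString.py | secondsToRemoveOccurrences2
-- ===== SOURCE A (Python) =====
-- def secondsToRemoveOccurrences2(s: str) -> int:
--     # O(N)
--     # 对于任何一个1而言，它的任何一次移动意味着超越了它之前的一个0.因为最终这个1要超越所有它之前的0，
--     # 假设这些0的数目是count，那么说明这个1最少要移动count次。
--
--     # 但是这个1极有可能会被前面的1所阻挡。一旦这个1的前进过程被阻挡到，那么意味着从此后，它的前进
--     # 只能在前一个1移动一步之后再进行。也就是说，如果前一个1移动了x次到达期待位置，这一个1只能在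
--     # 第x+1步之后才能到达期待位置（也就是前一个1的后一个位置）。所以最终的答案是max(x+1,count)
--
--     # 由此我们可以从前一个1的答案递归出下一个1的答案。最终答案就是最后一个1需要多少步移动到期待位置。
--     cnt, res = 0, 0
--     for i in range(len(s)):
--         if s[i] == '0':
--             cnt += 1
--         elif cnt > 0:
--             res = max(res+1, cnt)
--     return res
-- ===== SOURCE B (Python) =====
-- def secondsToRemoveOccurrences2(s: str) -> int:
--     # Reversed single pass: each mover (non-'0' char) with z zeros to its left and
--     # a movers to its right finishes at time z + a; the answer is the max of these.
--     best = 0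
--     after = 0
--     zleft = s.count('0')
--     for ch in reversed(s):
--         if ch == '0':
--             zleft -= 1
--         else:
--             if zleft > 0:
--                 best = max(best, zleft + after)
--             after += 1
--     return best
-- ===== Notes on version B (the rewrite author's own statement) =====
-- stated objective: alternative
-- what changed: A runs a left-to-right DP with the coupled recurrence res = max(res+1, cnt); B makes a single right-to-left pass that scores each mover (non-'0' char) independently as (zeros to its left) + (movers to its right) and returns the max of these scores.
import Mathlib
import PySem

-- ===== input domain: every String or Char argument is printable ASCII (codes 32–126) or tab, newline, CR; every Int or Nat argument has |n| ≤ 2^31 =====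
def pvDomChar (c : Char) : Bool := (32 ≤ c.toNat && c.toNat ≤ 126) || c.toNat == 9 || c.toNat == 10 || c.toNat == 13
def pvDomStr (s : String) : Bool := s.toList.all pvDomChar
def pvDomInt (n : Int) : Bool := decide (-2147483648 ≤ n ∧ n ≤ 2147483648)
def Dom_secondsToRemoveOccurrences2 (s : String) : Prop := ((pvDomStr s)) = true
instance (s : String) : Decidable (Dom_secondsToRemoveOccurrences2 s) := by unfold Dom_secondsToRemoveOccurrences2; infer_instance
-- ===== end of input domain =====

-- B replaces A's left-to-right recurrence res = max(res+1, cnt) by a right-to-left pass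
-- scoring each mover independently; same O(n) cost, alternative algorithm.

-- ===== PORT A =====
def secondsToRemoveOccurrences2 (s : String) : Int :=
  ((PySem.List.pyRange 0 (PySem.List.len s.toList)).foldl
    (fun (p : Int × Int) i =>
      if PySem.List.pyGetD s.toList i ' ' = '0' then (p.1 + 1, p.2)
      else if p.1 > 0 then (p.1, max (p.2 + 1) p.1)
      else p) ((0 : Int), (0 : Int))).2

-- ===== PORT B =====
def secondsToRemoveOccurrences2_alt (s : String) : Int :=
  ((s.toList.reverse).foldl
    (fun (p : Int × Int × Int) ch =>
      if ch = '0' then (p.1, p.2.1, p.2.2 - 1)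
      else ((if p.2.2 > 0 then max p.1 (p.2.2 + p.2.1) else p.1), p.2.1 + 1, p.2.2))
    ((0 : Int), (0 : Int), ((PySem.Str.count s "0" : Nat) : Int))).1

-- ===== PRECONDITION & SPEC =====
def Spec_secondsToRemoveOccurrences2 (s : String) (out : Int) : Prop := out = secondsToRemoveOccurrences2_alt s
instance (s : String) (out : Int) : Decidable (Spec_secondsToRemoveOccurrences2 s out) := by unfold Spec_secondsToRemoveOccurrences2; infer_instance

-- ===== CLAIM (what is proved, stated in full; the proofs are below) =====
def Claim_equal_secondsToRemoveOccurrences2 : Prop := ∀ (s : String), Dom_secondsToRemoveOccurrences2 s → Spec_secondsToRemoveOccurrences2 s (secondsToRemoveOccurrences2 s)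

-- ===== LEMMAS AND PROOFS =====

-- number of "movers" (non-'0' characters) in t
def pvMovers (t : List Char) : Nat := t.countP (fun c => c ≠ '0')

-- the common value: with d zeros already to the left of t, the max over triggered movers
-- of (zeros to its left) + (movers to its right)
def pvF : List Char → Nat → Int
  | [], _ => 0
  | x :: t, d =>
      if x = '0' then pvF t (d + 1)
      else if 0 < d then max (pvF t d) ((d : Int) + (pvMovers t : Int))
      else pvF t d

-- number of movers in t that trigger A's `elif cnt > 0` branch, given d zeros to the left
def pvK : List Char → Nat → Nat
  | [], _ => 0
  | x :: t, d =>
      if x = '0' then pvK t (d + 1)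
      else if 0 < d then pvK t d + 1
      else pvK t d

theorem pvK_eq_movers (t : List Char) (d : Nat) (hd : 0 < d) : pvK t d = pvMovers t := by
  induction t generalizing d with
  | nil => simp [pvK, pvMovers]
  | cons x t ih =>
    by_cases hx : x = '0'
    · simp [pvK, pvMovers, hx, ih (d + 1) (by omega)]
    · simp [pvK, pvMovers, hx, hd, ih d hd]

theorem pvK_le_pvF (t : List Char) (d : Nat) : (pvK t d : Int) ≤ pvF t d := by
  induction t generalizing d with
  | nil => simp [pvK, pvF]
  | cons x t ih =>
    by_cases hx : x = '0'
    · simpa [pvK, pvF, hx] using ih (d + 1)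
    · by_cases hd : 0 < d
      · simp only [pvK, pvF, hx, hd, if_true, if_false]
        rw [pvK_eq_movers t d hd]
        push_cast
        have := le_max_right (pvF t d) ((d : Int) + (pvMovers t : Int))
        omega
      · simpa [pvK, pvF, hx, hd] using ih d

-- A's loop body, on characters
def pvStepA (p : Int × Int) (c : Char) : Int × Int :=
  if c = '0' then (p.1 + 1, p.2)
  else if p.1 > 0 then (p.1, max (p.2 + 1) p.1)
  else p

theorem pvFoldA (t : List Char) (d : Nat) (r : Int) (hr : 0 ≤ r) :
    (t.foldl pvStepA ((d : Int), r)).2 = max (r + (pvK t d : Int)) (pvF t d) := by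
  induction t generalizing d r with
  | nil => simp [pvK, pvF]; omega
  | cons x t ih =>
    by_cases hx : x = '0'
    · have hcast : ((d : Int) + 1) = (((d + 1 : Nat)) : Int) := by push_cast; ring
      simp only [List.foldl_cons, pvStepA, hx, if_true, pvK, pvF, hcast]
      exact ih (d + 1) r hr
    · by_cases hd : 0 < d
      · have hdi : (d : Int) > 0 := by exact_mod_cast hd
        simp only [List.foldl_cons, pvStepA, hx, if_false, hdi, if_true, pvK, pvF, hd]
        rw [ih d (max (r + 1) (d : Int)) (by omega)]
        rw [pvK_eq_movers t d hd]
        push_cast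
        omega
      · have hd0 : d = 0 := by omega
        have hdi : ¬ ((d : Int) > 0) := by omega
        simp only [List.foldl_cons, pvStepA, hx, hdi, if_false, pvK, pvF, hd]
        exact ih d r hr

-- B's loop body
def pvStepB (p : Int × Int × Int) (ch : Char) : Int × Int × Int :=
  if ch = '0' then (p.1, p.2.1, p.2.2 - 1)
  else ((if p.2.2 > 0 then max p.1 (p.2.2 + p.2.1) else p.1), p.2.1 + 1, p.2.2)

theorem pvFoldB (t : List Char) (d : Nat) :
    (t.foldr (fun x p => pvStepB p x)
        ((0 : Int), (0 : Int), ((t.count '0' + d : Nat) : Int)))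
      = (pvF t d, (pvMovers t : Int), (d : Int)) := by
  induction t generalizing d with
  | nil => simp [pvF, pvMovers]
  | cons x t ih =>
    by_cases hx : x = '0'
    · have hcnt : ((x :: t).count '0' + d) = (t.count '0' + (d + 1)) := by
        simp [hx]; omega
      rw [List.foldr_cons, hcnt, ih (d + 1)]
      simp [pvStepB, hx, pvF, pvMovers]
    · have hcnt : ((x :: t).count '0' + d) = (t.count '0' + d) := by
        simp [hx]
      rw [List.foldr_cons, hcnt, ih d]
      by_cases hd : 0 < d
      · simp [pvStepB, hx, pvF, pvMovers, hd]
      · simp [pvStepB, hx, pvF, pvMovers, hd]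

-- Python's s.count('0') for a one-character pattern is List.count
theorem pvCount_go_singleton (c : Char) (fuel : Nat) (l : List Char) (acc : Nat)
    (h : l.length ≤ fuel) :
    PySem.Chars.count.go [c] fuel l acc = acc + l.count c := by
  induction fuel generalizing l acc with
  | zero =>
    have : l = [] := by
      cases l with
      | nil => rfl
      | cons a t => simp at h
    simp [this, PySem.Chars.count.go]
  | succ n ih =>
    cases l with
    | nil => simp [PySem.Chars.count.go]
    | cons a t =>
      simp only [PySem.Chars.count.go]
      by_cases hac : a = c
      · have hpre : List.isPrefixOf [c] (a :: t) = true := by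
          simp [List.isPrefixOf, hac]
        rw [if_pos hpre]
        simp only [List.length_singleton, List.drop_one, List.tail_cons]
        rw [ih t (acc + 1) (by simpa using Nat.lt_succ_iff.mp (by simpa using h))]
        simp [hac]; omega
      · have hpre : ¬ (List.isPrefixOf [c] (a :: t) = true) := by
          simp [List.isPrefixOf]
          exact fun hh => (hac hh.symm).elim
        rw [if_neg hpre]
        rw [ih t acc (by simpa using Nat.lt_succ_iff.mp (by simpa using h))]
        simp [hac]
  
theorem pvChars_count_singleton (l : List Char) (c : Char) :
    PySem.Chars.count l [c] = l.count c := by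
  simp only [PySem.Chars.count, List.isEmpty_cons]
  simpa using pvCount_go_singleton c l.length l 0 (le_refl _)

theorem pvStr_count_zero (s : String) : (PySem.Str.count s "0" : Nat) = s.toList.count '0' := by
  rw [PySem.Str.count_eq]
  exact pvChars_count_singleton s.toList '0'

-- ===== VERDICT (by name: the statement is the Claim_ definition above) =====
theorem secondsToRemoveOccurrences2_spec : Claim_equal_secondsToRemoveOccurrences2 := by
  intro s _
  unfold Spec_secondsToRemoveOccurrences2 secondsToRemoveOccurrences2 secondsToRemoveOccurrences2_alt
  rw [PySem.List.foldl_pyRange_zero_pyGetD s.toList ' '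
      (fun (p : Int × Int) c =>
        if c = '0' then (p.1 + 1, p.2)
        else if p.1 > 0 then (p.1, max (p.2 + 1) p.1)
        else p) ((0 : Int), (0 : Int))]
  rw [List.foldl_reverse]
  have hA : (s.toList.foldl pvStepA (((0 : Nat) : Int), (0 : Int))).2
      = max ((0 : Int) + (pvK s.toList 0 : Int)) (pvF s.toList 0) :=
    pvFoldA s.toList 0 0 (le_refl 0)
  have hB := pvFoldB s.toList 0
  rw [pvStr_count_zero]
  have hcnt : ((s.toList.count '0' : Nat) : Int) = ((s.toList.count '0' + 0 : Nat) : Int) := by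
    norm_num
  rw [hcnt]
  show (s.toList.foldl pvStepA ((0 : Int), (0 : Int))).2
      = (s.toList.foldr (fun x p => pvStepB p x)
          ((0 : Int), (0 : Int), ((s.toList.count '0' + 0 : Nat) : Int))).1
  rw [hB]
  have : ((0 : Nat) : Int) = (0 : Int) := rfl
  rw [show ((0 : Int), (0 : Int)) = (((0 : Nat) : Int), (0 : Int)) from rfl, hA]
  simp
  exact le_trans (pvK_le_pvF s.toList 0) (le_refl _)
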